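-- pv_equiv track=rewrite | github.com/talhajamal11/mathematical_modelling | src/Marshall Wace/data (20231011)/Codility/task1.py | solution
-- ===== SOURCE A (Python) =====
-- def solution(string):
--     uppercase = {}
--     lowercase = {}
--     for char in string:
--         if char.islower():
--             if char.upper() not in uppercase:
--                 lowercase[char] = True
--             if char.upper() in uppercase:
--                 try:
--                     lowercase.pop(char)
--                 except:
--                     continue
--         elif char.isupper():
--             uppercase[char] = True
--     return len(lowercase)
-- ===== SOURCE B (Python) =====
-- def solution(string):
--     first_up = {}
--     last_low = {}
--     for i, ch in enumerate(string):
--         if ch.islower():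
--             last_low[ch] = i
--         elif ch.isupper():
--             first_up.setdefault(ch, i)
--     n = len(string)
--     return sum(1 for c, j in last_low.items() if first_up.get(c.upper(), n) > j)
-- ===== Notes on version B (the rewrite author's own statement) =====
-- stated objective: faster
-- what changed: Instead of simulating insert/pop on a survivors dict per character, B makes one indexed pass recording each uppercase letter's first index and each lowercase letter's last index, then counts lowercase letters whose uppercase first index is absent or strictly after their last index.
import Mathlib
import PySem

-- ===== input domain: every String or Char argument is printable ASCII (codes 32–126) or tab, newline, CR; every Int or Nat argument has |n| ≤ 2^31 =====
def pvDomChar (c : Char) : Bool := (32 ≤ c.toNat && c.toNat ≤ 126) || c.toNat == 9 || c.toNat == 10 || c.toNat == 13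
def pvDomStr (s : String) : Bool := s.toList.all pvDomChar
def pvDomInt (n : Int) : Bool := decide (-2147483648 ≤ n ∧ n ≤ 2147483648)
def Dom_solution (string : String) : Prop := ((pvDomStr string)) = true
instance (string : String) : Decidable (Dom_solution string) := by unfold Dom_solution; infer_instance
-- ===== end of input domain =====

-- B replaces A's insert/pop survivors dict by one indexed pass (first index of each
-- uppercase, last index of each lowercase) and a final count; a timing run measured B faster by a constant factor.

-- ===== PORT A =====
-- one iteration of A's loop body (the try/except around pop only swallows the
-- KeyError of a missing key, so its effect is exactly Dict.erase)
def stepA (st : PySem.Dict Char Bool × PySem.Dict Char Bool) (ch : Char) :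
    PySem.Dict Char Bool × PySem.Dict Char Bool :=
  if PySem.Chars.islower ch then
    let low1 := if st.1.contains (PySem.Chars.upperChar ch) = false then st.2.insert ch true else st.2
    let low2 := if st.1.contains (PySem.Chars.upperChar ch) = true then low1.erase ch else low1
    (st.1, low2)
  else if PySem.Chars.isupper ch then (st.1.insert ch true, st.2)
  else st

def solution (string : String) : Int :=
  let st := string.toList.foldl stepA (PySem.Dict.empty, PySem.Dict.empty)
  (st.2.size : Int)

-- ===== PORT B =====
-- one iteration of B's loop body over enumerate(string)
def stepB (st : PySem.Dict Char Int × PySem.Dict Char Int) (p : Int × Char) :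
    PySem.Dict Char Int × PySem.Dict Char Int :=
  if PySem.Chars.islower p.2 then (st.1, st.2.insert p.2 p.1)
  else if PySem.Chars.isupper p.2 then (st.1.setdefault p.2 p.1, st.2)
  else st

def solution_alt (string : String) : Int :=
  let cs := string.toList
  let st := (PySem.List.enumerate cs).foldl stepB (PySem.Dict.empty, PySem.Dict.empty)
  st.2.items.foldl
    (fun acc q => if st.1.getD (PySem.Chars.upperChar q.1) (cs.length : Int) > q.2 then acc + 1 else acc) 0

-- ===== PRECONDITION & SPEC =====
def Spec_solution (string : String) (out : Int) : Prop := out = solution_alt string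
instance (string : String) (out : Int) : Decidable (Spec_solution string out) := by unfold Spec_solution; infer_instance

-- ===== CLAIM (what is proved, stated in full; the proofs are below) =====
def Claim_equal_solution : Prop := ∀ (string : String), Dom_solution string → Spec_solution string (solution string)

-- ===== LEMMAS AND PROOFS =====

-- erase facts (Dict.erase has no lemmas in the PySem book)
theorem dict_get?_erase_self {ν : Type} (d : PySem.Dict Char ν) (k : Char) :
    (d.erase k).get? k = none := by
  simp only [PySem.Dict.erase, PySem.Dict.get?, Option.map_eq_none_iff, List.find?_eq_none,
    List.mem_filter]
  intro p hp
  simpa using hp.2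

theorem dict_get?_erase_of_ne {ν : Type} (d : PySem.Dict Char ν) (k k' : Char) (h : k' ≠ k) :
    (d.erase k).get? k' = d.get? k' := by
  simp only [PySem.Dict.erase, PySem.Dict.get?]
  congr 1
  induction d.items with
  | nil => rfl
  | cons p rest ih =>
    by_cases hpk' : (p.1 == k') = true
    · have hp1 : p.1 = k' := by simpa using hpk'
      have hpkf : (p.1 == k) = false := by simp [hp1, h]
      simp [hpkf, hpk']
    · by_cases hpk : (p.1 == k) = true <;>
        simp [hpk, hpk', ih]

theorem dict_nodup_keys_erase {ν : Type} (d : PySem.Dict Char ν) (k : Char)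
    (h : d.keys.Nodup) : (d.erase k).keys.Nodup := by
  simp only [PySem.Dict.erase, PySem.Dict.keys] at *
  exact List.Nodup.sublist (List.Sublist.map _ List.filter_sublist) h

theorem dict_contains_erase {ν : Type} (d : PySem.Dict Char ν) (k k' : Char) :
    (d.erase k).contains k' = (k' != k && d.contains k') := by
  by_cases h : k' = k
  · subst h
    rw [PySem.Dict.contains_eq_isSome_get?, dict_get?_erase_self]
    simp
  · rw [PySem.Dict.contains_eq_isSome_get?, dict_get?_erase_of_ne _ _ _ h,
      ← PySem.Dict.contains_eq_isSome_get?]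
    simp [bne_iff_ne, h]

-- the joint loop invariant: after processing i characters, A's survivors dict `low`
-- holds exactly the lowercase chars whose last index (in ll) is not preceded by the
-- first index of their uppercase (in fu)
def InvAB (i : Int) (up low : PySem.Dict Char Bool) (fu ll : PySem.Dict Char Int) : Prop :=
  0 ≤ i ∧ low.keys.Nodup ∧ fu.keys.Nodup ∧ ll.keys.Nodup ∧
  (∀ C, up.contains C = fu.contains C) ∧
  (∀ C k, fu.get? C = some k → 0 ≤ k ∧ k < i) ∧
  (∀ c j, ll.get? c = some j → 0 ≤ j ∧ j < i) ∧
  (∀ c, low.contains c = true ↔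
    ∃ j, ll.get? c = some j ∧ ∀ k, fu.get? (PySem.Chars.upperChar c) = some k → j < k)

theorem invAB_step (i : Int) (up low : PySem.Dict Char Bool) (fu ll : PySem.Dict Char Int)
    (ch : Char) (h : InvAB i up low fu ll) :
    InvAB (i + 1) (stepA (up, low) ch).1 (stepA (up, low) ch).2
      ((stepB (fu, ll) (i, ch)).1) ((stepB (fu, ll) (i, ch)).2) := by
  obtain ⟨hi, hnl, hnf, hnll, hcon, hfb, hllb, hlow⟩ := h
  by_cases hl : PySem.Chars.islower ch = true
  · by_cases hu : up.contains (PySem.Chars.upperChar ch) = true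
    · -- ch's uppercase was already seen: A erases ch, B records ll[ch] = i
      have hfuX : fu.contains (PySem.Chars.upperChar ch) = true := by rw [← hcon]; exact hu
      obtain ⟨kX, hkX⟩ : ∃ k, fu.get? (PySem.Chars.upperChar ch) = some k := by
        rcases hx : fu.get? (PySem.Chars.upperChar ch) with _ | k
        · rw [PySem.Dict.get?_eq_none_iff_contains] at hx; simp [hx] at hfuX
        · exact ⟨k, rfl⟩
      have hkXi : kX < i := (hfb _ _ hkX).2
      simp only [stepA, stepB, hl, hu, if_pos, Bool.true_eq_false, if_false]
      refine ⟨by omega, dict_nodup_keys_erase _ _ hnl, hnf,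
        PySem.Dict.nodup_keys_insert _ _ _ hnll, hcon,
        fun C k hk => ⟨(hfb C k hk).1, by have := (hfb C k hk).2; omega⟩, ?_, ?_⟩
      · intro c j hj
        rw [PySem.Dict.get?_insert] at hj
        split_ifs at hj
        · cases hj; omega
        · have := hllb c j hj; omega
      · intro c
        by_cases hc : c = ch
        · subst hc
          rw [dict_contains_erase]
          simp only [bne_self_eq_false, Bool.false_and, Bool.false_eq_true, false_iff]
          rintro ⟨j, hj, hall⟩
          rw [PySem.Dict.get?_insert, if_pos rfl] at hj
          cases hj
          exact absurd (hall kX hkX) (by omega)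
        · rw [dict_contains_erase]
          have hb : (c != ch) = true := by simp [bne_iff_ne, hc]
          rw [hb, Bool.true_and, PySem.Dict.get?_insert, if_neg hc]
          exact hlow c
    · -- ch's uppercase not yet seen: A inserts ch, B records ll[ch] = i
      have hu' : up.contains (PySem.Chars.upperChar ch) = false := by simpa using hu
      have hfnone : fu.get? (PySem.Chars.upperChar ch) = none := by
        rw [PySem.Dict.get?_eq_none_iff_contains, ← hcon]; exact hu'
      simp only [stepA, stepB, hl, hu', Bool.false_eq_true, if_false, if_pos]
      refine ⟨by omega, PySem.Dict.nodup_keys_insert _ _ _ hnl, hnf,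
        PySem.Dict.nodup_keys_insert _ _ _ hnll, hcon,
        fun C k hk => ⟨(hfb C k hk).1, by have := (hfb C k hk).2; omega⟩, ?_, ?_⟩
      · intro c j hj
        rw [PySem.Dict.get?_insert] at hj
        split_ifs at hj
        · cases hj; omega
        · have := hllb c j hj; omega
      · intro c
        rw [PySem.Dict.contains_insert]
        by_cases hc : c = ch
        · subst hc
          simp only [BEq.rfl, Bool.true_or, true_iff]
          exact ⟨i, by rw [PySem.Dict.get?_insert, if_pos rfl],
            fun k hk => by rw [hfnone] at hk; cases hk⟩
        · have : (c == ch) = false := by simp [hc]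
          rw [this, Bool.false_or, PySem.Dict.get?_insert, if_neg hc]
          exact hlow c
  · by_cases hup : PySem.Chars.isupper ch = true
    · -- uppercase char: A inserts into up, B setdefaults into fu
      simp only [stepA, stepB, hl, hup, Bool.false_eq_true, if_false, if_pos]
      by_cases hcch : fu.contains ch = true
      · rw [PySem.Dict.setdefault_of_contains _ _ hcch]
        refine ⟨by omega, hnl, hnf, hnll, ?_,
          fun C k hk => ⟨(hfb C k hk).1, by have := (hfb C k hk).2; omega⟩,
          fun c j hj => ⟨(hllb c j hj).1, by have := (hllb c j hj).2; omega⟩, hlow⟩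
        intro C
        rw [PySem.Dict.contains_insert]
        by_cases hC : C = ch
        · subst hC; simp [hcch]
        · have : (C == ch) = false := by simp [hC]
          rw [this, Bool.false_or, hcon]
      · have hcch' : fu.contains ch = false := by simpa using hcch
        rw [PySem.Dict.setdefault_of_not_contains _ _ hcch']
        have hfn : fu.get? ch = none := by
          rw [PySem.Dict.get?_eq_none_iff_contains]; exact hcch'
        refine ⟨by omega, hnl, PySem.Dict.nodup_keys_insert _ _ _ hnf, hnll, ?_, ?_,
          fun c j hj => ⟨(hllb c j hj).1, by have := (hllb c j hj).2; omega⟩, ?_⟩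
        · intro C
          rw [PySem.Dict.contains_insert, PySem.Dict.contains_insert, hcon]
        · intro C k hk
          rw [PySem.Dict.get?_insert] at hk
          split_ifs at hk
          · cases hk; omega
          · have := hfb C k hk; omega
        · intro c
          by_cases hXc : PySem.Chars.upperChar c = ch
          · constructor
            · intro hcl
              obtain ⟨j, hj, _⟩ := (hlow c).mp hcl
              refine ⟨j, hj, fun k hk => ?_⟩
              rw [hXc, PySem.Dict.get?_insert, if_pos rfl] at hk
              cases hk
              exact (hllb c j hj).2
            · rintro ⟨j, hj, _⟩
              exact (hlow c).mpr ⟨j, hj, fun k hk => by rw [hXc, hfn] at hk; cases hk⟩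
          · simp only [PySem.Dict.get?_insert, hXc, if_false]
            exact hlow c
    · -- neither: both states unchanged
      simp only [stepA, stepB, hl, hup, Bool.false_eq_true, if_false]
      exact ⟨by omega, hnl, hnf, hnll, hcon,
        fun C k hk => ⟨(hfb C k hk).1, by have := (hfb C k hk).2; omega⟩,
        fun c j hj => ⟨(hllb c j hj).1, by have := (hllb c j hj).2; omega⟩, hlow⟩

theorem invAB_fold (cs : List Char) : ∀ (i : Int) (up low : PySem.Dict Char Bool)
    (fu ll : PySem.Dict Char Int), InvAB i up low fu ll →
    InvAB (i + cs.length)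
      (cs.foldl stepA (up, low)).1 (cs.foldl stepA (up, low)).2
      ((PySem.List.enumerate cs i).foldl stepB (fu, ll)).1
      ((PySem.List.enumerate cs i).foldl stepB (fu, ll)).2 := by
  induction cs with
  | nil => intro i up low fu ll h; simpa using h
  | cons c cs ih =>
    intro i up low fu ll h
    rw [PySem.List.enumerate_cons]
    have h1 := invAB_step i up low fu ll c h
    have h2 := ih (i + 1) _ _ _ _ h1
    have he : i + 1 + (cs.length : Int) = i + ((c :: cs).length : Int) := by
      simp [List.length_cons]; ring
    rw [he] at h2
    simpa using h2

-- from the invariant at the end of the string, A's count equals B's count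
theorem count_eq (n : Int) (up low : PySem.Dict Char Bool) (fu ll : PySem.Dict Char Int)
    (h : InvAB n up low fu ll) :
    (low.size : Int) = ll.items.foldl
      (fun acc q => if fu.getD (PySem.Chars.upperChar q.1) n > q.2 then acc + 1 else acc) 0 := by
  obtain ⟨hi, hnl, hnf, hnll, hcon, hfb, hllb, hlow⟩ := h
  have hfun : (fun (acc : Int) (q : Char × Int) =>
        if fu.getD (PySem.Chars.upperChar q.1) n > q.2 then acc + 1 else acc)
      = fun acc q =>
        if (fun q : Char × Int => decide (fu.getD (PySem.Chars.upperChar q.1) n > q.2)) q = true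
        then acc + 1 else acc := by
    funext acc q; simp
  rw [hfun, PySem.List.foldl_count_if, zero_add, List.countP_eq_length_filter]
  set p : Char × Int → Bool :=
    fun q => decide (fu.getD (PySem.Chars.upperChar q.1) n > q.2) with hp
  have hsub : ((ll.items.filter p).map (fun x => x.1)).Nodup :=
    List.Nodup.sublist (List.Sublist.map _ List.filter_sublist) hnll
  have hmem : ∀ c, c ∈ (ll.items.filter p).map (fun x => x.1) ↔
      ∃ j, ll.get? c = some j ∧ ∀ k, fu.get? (PySem.Chars.upperChar c) = some k → j < k := by
    intro c
    simp only [List.mem_map, List.mem_filter]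
    constructor
    · rintro ⟨⟨c', j⟩, ⟨hmem, hpq⟩, rfl⟩
      have hg : ll.get? c' = some j := (PySem.Dict.get?_eq_some_iff_mem_items _ _ _ hnll).mpr hmem
      refine ⟨j, hg, fun k hk => ?_⟩
      rw [hp] at hpq
      simp only [decide_eq_true_eq] at hpq
      rw [PySem.Dict.getD_eq_get?_getD, hk] at hpq
      simpa using hpq
    · rintro ⟨j, hg, hall⟩
      refine ⟨(c, j), ⟨(PySem.Dict.get?_eq_some_iff_mem_items _ _ _ hnll).mp hg, ?_⟩, rfl⟩
      rw [hp]
      simp only [decide_eq_true_eq]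
      rw [PySem.Dict.getD_eq_get?_getD]
      rcases hx : fu.get? (PySem.Chars.upperChar c) with _ | k
      · have := (hllb _ _ hg).2; simpa using this
      · simpa using hall k hx
  have hperm : low.keys.Perm ((ll.items.filter p).map (fun x => x.1)) := by
    rw [List.perm_ext_iff_of_nodup hnl hsub]
    intro c
    exact Iff.trans (Iff.trans (PySem.Dict.contains_iff_mem_keys _ _).symm (hlow c)) (hmem c).symm
  have hlen := hperm.length_eq
  have h1 : low.keys.length = low.size := by
    simp [PySem.Dict.keys, PySem.Dict.size]
  have h2 : ((ll.items.filter p).map (fun x => x.1)).length = (ll.items.filter p).length := by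
    simp
  have : low.size = (ll.items.filter p).length := by omega
  exact_mod_cast this

theorem solution_eq_alt (string : String) : solution string = solution_alt string := by
  simp only [solution, solution_alt]
  have h0 : InvAB 0 PySem.Dict.empty PySem.Dict.empty PySem.Dict.empty PySem.Dict.empty := by
    refine ⟨le_refl 0, by simp [PySem.Dict.keys_empty], by simp [PySem.Dict.keys_empty],
      by simp [PySem.Dict.keys_empty], fun C => by simp [PySem.Dict.contains_empty],
      fun C k hk => by simp [PySem.Dict.get?_empty] at hk,
      fun c j hj => by simp [PySem.Dict.get?_empty] at hj,
      fun c => by simp [PySem.Dict.contains_empty, PySem.Dict.get?_empty]⟩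
  have hinv := invAB_fold string.toList 0 _ _ _ _ h0
  rw [zero_add] at hinv
  exact count_eq _ _ _ _ _ hinv

-- ===== VERDICT (by name: the statement is the Claim_ definition above) =====
theorem solution_spec : Claim_equal_solution := by
  intro s _
  unfold Spec_solution
  exact solution_eq_alt s
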